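-- pv_equiv track=rewrite | github.com/LucaLightW/Visual-Keyboard | Main.py | sanitize_key_id
-- ===== SOURCE A (Python) =====
-- def sanitize_key_id(key_id):
--     # Mapping of special keys to strings that are allowed in file names
--     special_key_mapping = {
--         '\\': 'backslash',
--         '|': 'pipe',
--         '<': 'less_than',
--         '>': 'greater_than',
--         ':': 'colon',
--         '"': 'double_quote',
--         '/': 'forward_slash',
--         '?': 'question_mark',
--         '*': 'asterisk',
--     }
--
--     # Replace each special key with its corresponding string
--     for key, replacement in special_key_mapping.items():
--         key_id = key_id.replace(key, replacement)
--
--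
--     return key_id
-- ===== SOURCE B (Python) =====
-- def sanitize_key_id(key_id):
--     # Mapping of special keys to strings that are allowed in file names
--     special_key_mapping = {
--         '\\': 'backslash',
--         '|': 'pipe',
--         '<': 'less_than',
--         '>': 'greater_than',
--         ':': 'colon',
--         '"': 'double_quote',
--         '/': 'forward_slash',
--         '?': 'question_mark',
--         '*': 'asterisk',
--     }
--     # Single pass: emit each character, or its replacement name if it is special
--     return ''.join(special_key_mapping.get(c, c) for c in key_id)
-- ===== Notes on version B (the rewrite author's own statement) =====
-- stated objective: idiomatic
-- what changed: Nine sequential full-string .replace passes are replaced by a single character-level pass that joins mapping.get(c, c) over the input; equivalent because no replacement string contains a mapped special character, so the sequential replaces never cascade.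
import Mathlib
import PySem

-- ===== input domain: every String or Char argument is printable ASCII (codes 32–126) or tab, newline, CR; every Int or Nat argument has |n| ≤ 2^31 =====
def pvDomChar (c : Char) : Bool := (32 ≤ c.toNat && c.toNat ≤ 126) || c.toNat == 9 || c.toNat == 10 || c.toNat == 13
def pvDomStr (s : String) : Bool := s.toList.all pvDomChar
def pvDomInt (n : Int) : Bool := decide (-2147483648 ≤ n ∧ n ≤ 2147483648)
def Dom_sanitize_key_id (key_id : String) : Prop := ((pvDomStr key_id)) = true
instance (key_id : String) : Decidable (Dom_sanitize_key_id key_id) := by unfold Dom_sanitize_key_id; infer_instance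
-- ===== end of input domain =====

-- B replaces A's nine sequential full-string replace passes by one character-level pass
-- joining mapping.get(c, c) over the input (idiomatic; same result since replacements never cascade).


-- ===== PORT A =====
-- A's dict of special keys (string keys, as in the Python)
def specialKeyMappingA : PySem.Dict String String :=
  PySem.Dict.mk [("\\", "backslash"), ("|", "pipe"), ("<", "less_than"), (">", "greater_than"),
    (":", "colon"), ("\"", "double_quote"), ("/", "forward_slash"), ("?", "question_mark"),
    ("*", "asterisk")]

-- for key, replacement in special_key_mapping.items(): key_id = key_id.replace(key, replacement)
def sanitize_key_id (key_id : String) : String :=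
  specialKeyMappingA.items.foldl (fun s kv => PySem.Str.replace s kv.1 kv.2) key_id

-- ===== PORT B =====
-- B's dict, looked up per character
def specialKeyMappingB : PySem.Dict Char String :=
  PySem.Dict.mk [('\\', "backslash"), ('|', "pipe"), ('<', "less_than"), ('>', "greater_than"),
    (':', "colon"), ('"', "double_quote"), ('/', "forward_slash"), ('?', "question_mark"),
    ('*', "asterisk")]

-- return ''.join(special_key_mapping.get(c, c) for c in key_id)
def sanitize_key_id_alt (key_id : String) : String :=
  PySem.Str.join "" (key_id.toList.map (fun c => (specialKeyMappingB.get? c).getD (String.ofList [c])))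

-- ===== PRECONDITION & SPEC =====
def Spec_sanitize_key_id (key_id : String) (out : String) : Prop := out = sanitize_key_id_alt key_id
instance (key_id : String) (out : String) : Decidable (Spec_sanitize_key_id key_id out) := by unfold Spec_sanitize_key_id; infer_instance

-- ===== CLAIM (what is proved, stated in full; the proofs are below) =====
def Claim_equal_sanitize_key_id : Prop := ∀ (key_id : String), Dom_sanitize_key_id key_id → Spec_sanitize_key_id key_id (sanitize_key_id key_id)

-- ===== LEMMAS AND PROOFS =====

-- one single-character replace step, as the substitution it performs on each character
def subChar (c : Char) (r : List Char) : Char → List Char := fun x => if x = c then r else [x]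

theorem go_single (c : Char) (new : List Char) :
    ∀ (l : List Char) (fuel : Nat) (acc : List Char), l.length ≤ fuel →
      PySem.Chars.replace.go [c] new fuel l acc = acc.reverse ++ l.flatMap (subChar c new) := by
  intro l
  induction l with
  | nil =>
    intro fuel acc _
    cases fuel <;> simp [PySem.Chars.replace.go]
  | cons c' t ih =>
    intro fuel acc h
    cases fuel with
    | zero => simp at h
    | succ n =>
      by_cases hc : c = c'
      · subst hc
        simp only [PySem.Chars.replace.go, List.isPrefixOf, beq_self_eq_true, Bool.true_and,
          List.length_cons] at *
        rw [if_pos trivial]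
        have hd : List.drop (List.length ([] : List Char) + 1) (c :: t) = t := rfl
        rw [hd, ih n (new.reverse ++ acc) (by omega)]
        simp [subChar, List.flatMap_cons]
      · simp only [PySem.Chars.replace.go, List.isPrefixOf, List.length_cons] at *
        have hb : (c == c') = false := by simp [hc]
        rw [hb]
        simp only [Bool.false_and, Bool.false_eq_true, if_false]
        rw [ih n (c' :: acc) (by omega)]
        simp [subChar, List.flatMap_cons, Ne.symm hc]

theorem replace_single (l : List Char) (c : Char) (new : List Char) :
    PySem.Chars.replace l [c] new = l.flatMap (subChar c new) := by
  unfold PySem.Chars.replace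
  simp only [List.isEmpty_cons, Bool.false_eq_true, if_false]
  exact go_single c new l l.length [] (le_refl _)

-- what B emits for one character
def emitChar (c : Char) : List Char :=
  ((specialKeyMappingB.get? c).getD (String.ofList [c])).toList

theorem intercalate_nil_eq_flatten (L : List (List Char)) : List.intercalate [] L = L.flatten := by
  induction L with
  | nil => rfl
  | cons a t ih => cases t <;> simp_all [List.intercalate, List.intersperse]

-- the nine substitutions, composed (right-nested, as the flatMap-associativity rewrite leaves them),
-- agree with B's per-character lookup
theorem compose_eq_emit (x : Char) :
    List.flatMap (fun x1 =>
      List.flatMap (fun x2 =>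
        List.flatMap (fun x3 =>
          List.flatMap (fun x4 =>
            List.flatMap (fun x5 =>
              List.flatMap (fun x6 =>
                List.flatMap (fun x7 =>
                  List.flatMap (subChar '*' "asterisk".toList)
                    (subChar '?' "question_mark".toList x7))
                  (subChar '/' "forward_slash".toList x6))
                (subChar '"' "double_quote".toList x5))
              (subChar ':' "colon".toList x4))
            (subChar '>' "greater_than".toList x3))
          (subChar '<' "less_than".toList x2))
        (subChar '|' "pipe".toList x1))
      (subChar '\\' "backslash".toList x) =
    String.toList ((specialKeyMappingB.get? x).getD (String.ofList [x])) := by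
  by_cases h1 : x = '\\'; · subst h1; decide
  by_cases h2 : x = '|'; · subst h2; decide
  by_cases h3 : x = '<'; · subst h3; decide
  by_cases h4 : x = '>'; · subst h4; decide
  by_cases h5 : x = ':'; · subst h5; decide
  by_cases h6 : x = '"'; · subst h6; decide
  by_cases h7 : x = '/'; · subst h7; decide
  by_cases h8 : x = '?'; · subst h8; decide
  by_cases h9 : x = '*'; · subst h9; decide
  simp [subChar, specialKeyMappingB, PySem.Dict.get?, h1, h2, h3, h4, h5, h6, h7, h8, h9,
    Ne.symm h1, Ne.symm h2, Ne.symm h3, Ne.symm h4, Ne.symm h5, Ne.symm h6, Ne.symm h7,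
    Ne.symm h8, Ne.symm h9]

-- ===== VERDICT (by name: the statement is the Claim_ definition above) =====
theorem sanitize_key_id_spec : Claim_equal_sanitize_key_id := by
  intro key_id _
  unfold Spec_sanitize_key_id sanitize_key_id sanitize_key_id_alt specialKeyMappingA
  simp only [List.foldl_cons, List.foldl_nil, PySem.Str.replace, String.toList_ofList]
  have hrep : ∀ (s : List Char) (c : Char) (new : List Char),
      PySem.Chars.replace s [c] new = s.flatMap (subChar c new) := replace_single
  rw [show ("\\" : String).toList = ['\\'] from rfl, show ("|" : String).toList = ['|'] from rfl,
    show ("<" : String).toList = ['<'] from rfl, show (">" : String).toList = ['>'] from rfl,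
    show (":" : String).toList = [':'] from rfl, show ("\"" : String).toList = ['"'] from rfl,
    show ("/" : String).toList = ['/'] from rfl, show ("?" : String).toList = ['?'] from rfl,
    show ("*" : String).toList = ['*'] from rfl]
  rw [hrep, hrep, hrep, hrep, hrep, hrep, hrep, hrep, hrep]
  rw [List.flatMap_assoc, List.flatMap_assoc, List.flatMap_assoc, List.flatMap_assoc,
    List.flatMap_assoc, List.flatMap_assoc, List.flatMap_assoc, List.flatMap_assoc]
  unfold PySem.Str.join PySem.Chars.join
  congr 1
  rw [show ("" : String).toList = [] from rfl, intercalate_nil_eq_flatten, List.map_map,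
    ← List.flatMap_def]
  simp only [Function.comp_def]
  apply List.flatMap_congr
  intro x hx
  exact compose_eq_emit x
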